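-- pv_equiv track=rewrite | github.com/bwang1008/AdventOfCode2023 | day10A.py | dfs_distances
-- ===== SOURCE A (Python) =====
-- from typing import Dict, List, Tuple
--
-- neighbor_map: Dict[str, List[Tuple[int, int]]] = {
--     "|": [(-1, 0), (1, 0)],
--     "-": [(0, -1), (0, 1)],
--     "L": [(-1, 0), (0, 1)],
--     "F": [(0, 1), (1, 0)],
--     "7": [(1, 0), (0, -1)],
--     "J": [(0, -1), (-1, 0)],
-- }
--
-- def valid(row: int, col: int, R: int, C: int) -> bool:
--     return 0 <= row < R and 0 <= col < C
--
-- def get_potential_neighbors(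
--     character: str, row: int, col: int
-- ) -> List[Tuple[int, int]]:
--     changes: List[Tuple[int, int]] = neighbor_map.get(character, [])
--     return [(row + dx, col + dy) for dx, dy in changes]
--
-- def dfs_distances(
--     board: List[List[str]], start_row: int, start_col: int
-- ) -> List[List[int]]:
--     R: int = len(board)
--     C: int = len(board[0])
--
--     visited: List[List[bool]] = [[False] * C for row in range(R)]
--     distances: List[List[int]] = [[R * C + 1] * C for row in range(R)]
--     distances[start_row][start_col] = 0
--
--     stack: List[Tuple[int, int]] = [(start_row, start_col)]
--
--     while stack:
--         curr_row, curr_col = stack.pop()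
--
--         if visited[curr_row][curr_col]:
--             continue
--         visited[curr_row][curr_col] = True
--
--         for neighbor_row, neighbor_col in get_potential_neighbors(
--             board[curr_row][curr_col], curr_row, curr_col
--         ):
--             if (
--                 valid(neighbor_row, neighbor_col, R, C)
--                 and board[neighbor_row][neighbor_col] != "."
--                 and not visited[neighbor_row][neighbor_col]
--             ):
--                 distances[neighbor_row][neighbor_col] = min(
--                     distances[neighbor_row][neighbor_col],
--                     1 + distances[curr_row][curr_col],
--                 )
--
--                 stack.append((neighbor_row, neighbor_col))
--
--                 # limit to one neighbor added / searched (for beginning node)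
--                 break
--
--     return distances
-- ===== SOURCE B (Python) =====
-- from typing import Dict, List, Optional, Tuple
--
-- neighbor_map: Dict[str, List[Tuple[int, int]]] = {
--     "|": [(-1, 0), (1, 0)],
--     "-": [(0, -1), (0, 1)],
--     "L": [(-1, 0), (0, 1)],
--     "F": [(0, 1), (1, 0)],
--     "7": [(1, 0), (0, -1)],
--     "J": [(0, -1), (-1, 0)],
-- }
--
-- def valid(row: int, col: int, R: int, C: int) -> bool:
--     return 0 <= row < R and 0 <= col < C
--
-- def get_potential_neighbors(
--     character: str, row: int, col: int
-- ) -> List[Tuple[int, int]]: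
--     changes: List[Tuple[int, int]] = neighbor_map.get(character, [])
--     return [(row + dx, col + dy) for dx, dy in changes]
--
-- def _first_step(
--     board: List[List[str]],
--     R: int,
--     C: int,
--     seen: List[List[bool]],
--     row: int,
--     col: int,
-- ) -> Optional[Tuple[int, int]]:
--     for nr, nc in get_potential_neighbors(board[row][col], row, col):
--         if valid(nr, nc, R, C) and board[nr][nc] != "." and not seen[nr][nc]:
--             return (nr, nc)
--     return None
--
-- def dfs_distances(
--     board: List[List[str]], start_row: int, start_col: int
-- ) -> List[List[int]]:
--     R: int = len(board)
--     C: int = len(board[0])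
--
--     # Phase 1: walk the pipe from the start, recording the ordered path.
--     seen: List[List[bool]] = [[False] * C for _ in range(R)]
--     seen[start_row][start_col] = True
--     path: List[Tuple[int, int]] = [(start_row, start_col)]
--     while True:
--         nxt = _first_step(board, R, C, seen, path[-1][0], path[-1][1])
--         if nxt is None:
--             break
--         seen[nxt[0]][nxt[1]] = True
--         path.append(nxt)
--
--     # Phase 2: distances are just the positions along the path.
--     distances: List[List[int]] = [[R * C + 1] * C for _ in range(R)]
--     for i, (r, c) in enumerate(path):
--         distances[r][c] = i
--     return distances
-- ===== Notes on version B (the rewrite author's own statement) =====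
-- stated objective: alternative
-- what changed: Replaces the fused stack-driven loop that incrementally min-updates a distance grid with a two-phase decomposition: first walk the single pipe path from the start (find-first-unseen-neighbor, no stack, no min), then fill the distance grid in one enumerate pass with each cell's path index.
-- outside the precondition, e.g. on dfs_distances([['-', '-'], ['.']], 0, 0): A returns [[0, 1], [5, 5]], B returns [[0, 1], [5, 5]]
import Mathlib
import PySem

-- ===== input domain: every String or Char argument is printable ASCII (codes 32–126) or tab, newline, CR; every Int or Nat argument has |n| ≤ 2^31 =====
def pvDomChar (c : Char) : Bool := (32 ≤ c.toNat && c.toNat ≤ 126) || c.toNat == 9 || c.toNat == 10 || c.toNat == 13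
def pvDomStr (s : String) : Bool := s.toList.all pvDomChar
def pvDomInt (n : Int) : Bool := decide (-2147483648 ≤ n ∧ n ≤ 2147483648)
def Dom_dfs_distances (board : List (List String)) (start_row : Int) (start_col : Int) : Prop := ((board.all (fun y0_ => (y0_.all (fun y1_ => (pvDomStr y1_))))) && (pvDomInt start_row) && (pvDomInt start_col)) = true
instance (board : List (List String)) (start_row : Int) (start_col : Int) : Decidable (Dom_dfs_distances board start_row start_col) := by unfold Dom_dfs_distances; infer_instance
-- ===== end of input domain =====

-- B separates the pipe walk (ordered path list) from distance assignment (one enumerate pass),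
-- replacing A's fused stack loop with incremental min-updates; same asymptotic cost (objective: alternative).


-- ===== PORT A =====
-- Module helpers shared by both Python versions (neighbor_map / valid / get_potential_neighbors).
-- pvChanges ch = neighbor_map.get(ch, []) : first-match lookup in the literal dict, written as the equivalent if-chain.
def pvChanges (ch : String) : List (Int × Int) :=
  if ch = "|" then [(-1, 0), (1, 0)]
  else if ch = "-" then [(0, -1), (0, 1)]
  else if ch = "L" then [(-1, 0), (0, 1)]
  else if ch = "F" then [(0, 1), (1, 0)]
  else if ch = "7" then [(1, 0), (0, -1)]
  else if ch = "J" then [(0, -1), (-1, 0)]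
  else []

def pvValid (row col R C : Int) : Bool :=
  decide (0 ≤ row ∧ row < R) && decide (0 ≤ col ∧ col < C)

def pvNeighbors (ch : String) (row col : Int) : List (Int × Int) :=
  (pvChanges ch).map (fun dc => (row + dc.1, col + dc.2))

-- g[r][c] and g[r][c] = v with Python index semantics (negative wrap; default only outside Pre_)
def pvGet2 {α : Type} (g : List (List α)) (r c : Int) (d : α) : α :=
  PySem.List.pyGetD (PySem.List.pyGetD g r []) c d

def pvSet2 {α : Type} (g : List (List α)) (r c : Int) (v : α) : List (List α) :=
  PySem.List.pySetD g r (PySem.List.pySetD (PySem.List.pyGetD g r []) c v)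

-- the neighbor test of the inner for loop (identical text in both Pythons)
def pvOk (board : List (List String)) (R C : Int) (V : List (List Bool)) (p : Int × Int) : Bool :=
  pvValid p.1 p.2 R C && !(pvGet2 board p.1 p.2 "" == ".") && !(pvGet2 V p.1 p.2 false)

-- A's inner 'for … if …: update distances; push; break' loop
def pvInner (board : List (List String)) (R C : Int) (V : List (List Bool)) (r c : Int)
    (D : List (List Int)) (st : List (Int × Int)) :
    List (Int × Int) → (List (List Int)) × List (Int × Int)
  | [] => (D, st)
  | n :: ns =>
    if pvOk board R C V n then
      (pvSet2 D n.1 n.2 (min (pvGet2 D n.1 n.2 0) (1 + pvGet2 D r c 0)), n :: st)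
    else pvInner board R C V r c D st ns

-- A's 'while stack' loop; stack head = top. Fuel R*C+1 bounds the iteration count
-- (each iteration pops one element; at most one push per newly visited cell), so it
-- never runs out on inputs satisfying Pre_.
def pvLoopA (board : List (List String)) (R C : Int) :
    Nat → List (Int × Int) → List (List Bool) → List (List Int) → List (List Int)
  | 0, _, _, D => D
  | _ + 1, [], _, D => D
  | f + 1, p :: rest, V, D =>
    if pvGet2 V p.1 p.2 false then pvLoopA board R C f rest V D
    else
      let V' := pvSet2 V p.1 p.2 true
      let r := pvInner board R C V' p.1 p.2 D rest (pvNeighbors (pvGet2 board p.1 p.2 "") p.1 p.2)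
      pvLoopA board R C f r.2 V' r.1

def dfs_distances (board : List (List String)) (start_row : Int) (start_col : Int) : List (List Int) :=
  let R : Int := board.length
  let C : Int := (PySem.List.pyGetD board 0 []).length
  let visited := List.replicate board.length (List.replicate (PySem.List.pyGetD board 0 ([] : List String)).length false)
  let distances := pvSet2 (List.replicate board.length (List.replicate (PySem.List.pyGetD board 0 ([] : List String)).length (R * C + 1))) start_row start_col 0
  pvLoopA board R C (board.length * (PySem.List.pyGetD board 0 ([] : List String)).length + 1) [(start_row, start_col)] visited distances

-- ===== PORT B =====
-- B's _first_step: first neighbor that is in-bounds, not '.', not yet seen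
-- (List.find? over the same neighbor list with the same test).
-- B's walk loop: emit the current cell, step to the first admissible neighbor; same fuel bound
-- (the path visits each cell at most once).
def pvWalk (board : List (List String)) (R C : Int) :
    Nat → List (List Bool) → Int → Int → List (Int × Int)
  | 0, _, _, _ => []
  | f + 1, seen, r, c =>
    match (pvNeighbors (pvGet2 board r c "") r c).find? (pvOk board R C seen) with
    | none => [(r, c)]
    | some n => (r, c) :: pvWalk board R C f (pvSet2 seen n.1 n.2 true) n.1 n.2

def dfs_distances_alt (board : List (List String)) (start_row : Int) (start_col : Int) : List (List Int) :=
  let R : Int := board.length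
  let C : Int := (PySem.List.pyGetD board 0 []).length
  let seen := pvSet2 (List.replicate board.length (List.replicate (PySem.List.pyGetD board 0 ([] : List String)).length false)) start_row start_col true
  let path := pvWalk board R C (board.length * (PySem.List.pyGetD board 0 ([] : List String)).length + 1) seen start_row start_col
  (PySem.List.enumerate path 0).foldl (fun d p => pvSet2 d p.2.1 p.2.2 p.1)
    (List.replicate board.length (List.replicate (PySem.List.pyGetD board 0 ([] : List String)).length (R * C + 1)))

-- ===== PRECONDITION & SPEC =====
-- Pre_ excludes: the empty board (len(board[0]) raises IndexError), start coordinates outside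
-- Python's index range for the grid (the initial distances[start_row][start_col] = 0 raises
-- IndexError), and ragged boards (rows of a length other than len(board[0])), on which A raises
-- IndexError whenever the walk touches a cell missing from a short row; on the remaining ragged
-- boards, whose walk stays inside all rows, A returns and B returns the same grid (see cites).
def Pre_dfs_distances (board : List (List String)) (start_row : Int) (start_col : Int) : Prop :=
  board ≠ [] ∧
  (∀ row ∈ board, row.length = (PySem.List.pyGetD board 0 ([] : List String)).length) ∧
  PySem.Raise.InRange board.length start_row ∧
  PySem.Raise.InRange (PySem.List.pyGetD board 0 ([] : List String)).length start_col

instance (board : List (List String)) (start_row : Int) (start_col : Int) : Decidable (Pre_dfs_distances board start_row start_col) := by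
  unfold Pre_dfs_distances; infer_instance

def pvWitness_dfs_distances : List (List String) × Int × Int :=
  ([["F", "7"], ["L", "J"]], 0, 0)

def Spec_dfs_distances (board : List (List String)) (start_row : Int) (start_col : Int) (out : List (List Int)) : Prop := out = dfs_distances_alt board start_row start_col
instance (board : List (List String)) (start_row : Int) (start_col : Int) (out : List (List Int)) : Decidable (Spec_dfs_distances board start_row start_col out) := by unfold Spec_dfs_distances; infer_instance

-- ===== CLAIM (what is proved, stated in full; the proofs are below) =====
def Claim_equal_dfs_distances : Prop := ∀ (board : List (List String)) (start_row : Int) (start_col : Int), Dom_dfs_distances board start_row start_col → Pre_dfs_distances board start_row start_col → Spec_dfs_distances board start_row start_col (dfs_distances board start_row start_col)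

-- ===== LEMMAS AND PROOFS =====

-- effective (wrapped) index of a Python index i into a list of length n
def pvEff (n : Nat) (i : Int) : Nat := if 0 ≤ i then i.toNat else n - (-i).toNat

lemma pvEff_lt {n : Nat} {i : Int} (h : PySem.Raise.InRange n i) : pvEff n i < n := by
  rcases h with ⟨h1, h2⟩
  unfold pvEff
  split <;> omega

lemma pyGetD_eff {α : Type} {xs : List α} {i : Int} (d : α) (h : PySem.Raise.InRange xs.length i) :
    PySem.List.pyGetD xs i d = xs.getD (pvEff xs.length i) d := by
  rcases h with ⟨h1, h2⟩
  simp only [PySem.List.pyGetD, PySem.List.pyGet?, PySem.List.pyIdx?, pvEff]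
  split
  · simp [List.getD, List.getElem?_eq_getElem (by omega : i.toNat < xs.length)]
  · simp [List.getD, List.getElem?_eq_getElem (by omega : xs.length - (-i).toNat < xs.length)]

lemma pySetD_eff {α : Type} {xs : List α} {i : Int} (v : α) (h : PySem.Raise.InRange xs.length i) :
    PySem.List.pySetD xs i v = xs.set (pvEff xs.length i) v := by
  rcases h with ⟨h1, h2⟩
  simp only [PySem.List.pySetD, PySem.List.pySet?, PySem.List.pyIdx?, pvEff]
  split <;> rfl

-- uniform shape of a grid
def pvShape {α : Type} (g : List (List α)) (R C : Nat) : Prop :=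
  g.length = R ∧ ∀ row ∈ g, row.length = C

-- nat-indexed grid access / update (what the ports' pvGet2 / pvSet2 become under Pre_)
def pvGG {α : Type} (g : List (List α)) (i j : Nat) (d : α) : α := (g.getD i []).getD j d
def pvGS {α : Type} (g : List (List α)) (i j : Nat) (v : α) : List (List α) :=
  g.set i ((g.getD i []).set j v)

-- false-entry count of the visited grid
def pvFalseCnt (V : List (List Bool)) : Nat := (V.map (fun row => row.count false)).sum

-- the distance-assignment pass of B, generalized to an arbitrary start index
def pvAssign (D : List (List Int)) (path : List (Int × Int)) (i : Int) : List (List Int) :=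
  (PySem.List.enumerate path i).foldl (fun d p => pvSet2 d p.2.1 p.2.2 p.1) D

lemma pvAssign_cons (D : List (List Int)) (p : Int × Int) (ps : List (Int × Int)) (i : Int) :
    pvAssign D (p :: ps) i = pvAssign (pvSet2 D p.1 p.2 i) ps (i + 1) := by
  simp [pvAssign, PySem.List.enumerate_cons]

lemma pvGet2_eq {α : Type} {g : List (List α)} {R C : Nat} (hg : pvShape g R C) {r c : Int}
    (hr : PySem.Raise.InRange R r) (hc : PySem.Raise.InRange C c) (d : α) :
    pvGet2 g r c d = pvGG g (pvEff R r) (pvEff C c) d := by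
  obtain ⟨hlen, hrow⟩ := hg
  subst hlen
  have hmem : g.getD (pvEff g.length r) [] ∈ g := by
    have := pvEff_lt hr
    rw [List.getD_eq_getElem _ _ (by omega)]
    exact List.getElem_mem _
  have hc' : PySem.Raise.InRange (g.getD (pvEff g.length r) []).length c := by
    rw [hrow _ hmem]; exact hc
  rw [pvGet2, pvGG, pyGetD_eff ([] : List α) hr, pyGetD_eff d hc', hrow _ hmem]

lemma pvSet2_eq {α : Type} {g : List (List α)} {R C : Nat} (hg : pvShape g R C) {r c : Int}
    (hr : PySem.Raise.InRange R r) (hc : PySem.Raise.InRange C c) (v : α) :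
    pvSet2 g r c v = pvGS g (pvEff R r) (pvEff C c) v := by
  obtain ⟨hlen, hrow⟩ := hg
  subst hlen
  have hmem : g.getD (pvEff g.length r) [] ∈ g := by
    have := pvEff_lt hr
    rw [List.getD_eq_getElem _ _ (by omega)]
    exact List.getElem_mem _
  have hc' : PySem.Raise.InRange (g.getD (pvEff g.length r) []).length c := by
    rw [hrow _ hmem]; exact hc
  rw [pvSet2, pvGS, pyGetD_eff ([] : List α) hr, pySetD_eff v hc', pySetD_eff _ hr,
    hrow _ hmem]

lemma pvShape_GS {α : Type} {g : List (List α)} {R C : Nat} (hg : pvShape g R C)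
    {i : Nat} (hi : i < R) (j : Nat) (v : α) : pvShape (pvGS g i j v) R C := by
  obtain ⟨hlen, hrow⟩ := hg
  refine ⟨by simp [pvGS, hlen], ?_⟩
  intro row hmem
  rcases List.mem_or_eq_of_mem_set hmem with h | h
  · exact hrow _ h
  · subst h
    rw [List.length_set]
    exact hrow _ (by rw [List.getD_eq_getElem _ _ (by omega)]; exact List.getElem_mem _)

lemma pvRow_len {α : Type} {g : List (List α)} {R C : Nat} (hg : pvShape g R C)
    {i : Nat} (hi : i < R) : (g.getD i []).length = C := by
  obtain ⟨hlen, hrow⟩ := hg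
  exact hrow _ (by rw [List.getD_eq_getElem _ _ (by omega)]; exact List.getElem_mem _)

lemma lGetD_eq {α : Type} {xs : List α} {j : Nat} (h : j < xs.length) (d d' : α) :
    xs.getD j d = xs.getD j d' := by
  rw [List.getD_eq_getElem _ _ h, List.getD_eq_getElem _ _ h]

lemma lGetD_set_self {α : Type} {xs : List α} {i : Nat} (h : i < xs.length) (v d : α) :
    (xs.set i v).getD i d = v := by
  rw [List.getD_eq_getElem?_getD, List.getElem?_set_self h, Option.getD_some]

lemma lGetD_set_ne {α : Type} (xs : List α) {i j : Nat} (h : i ≠ j) (v d : α) :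
    (xs.set i v).getD j d = xs.getD j d := by
  rw [List.getD_eq_getElem?_getD, List.getElem?_set_ne h, List.getD_eq_getElem?_getD]

lemma pvGG_irrel {α : Type} {g : List (List α)} {R C : Nat} (hg : pvShape g R C)
    {i j : Nat} (hi : i < R) (hj : j < C) (d d' : α) : pvGG g i j d = pvGG g i j d' := by
  have hr := pvRow_len hg hi
  exact lGetD_eq (by omega) d d'

lemma pvGG_GS_self {α : Type} {g : List (List α)} {R C : Nat} (hg : pvShape g R C)
    {i j : Nat} (hi : i < R) (hj : j < C) (v d : α) : pvGG (pvGS g i j v) i j d = v := by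
  have hlen : i < g.length := by have := hg.1; omega
  have hrl : j < (g.getD i []).length := by rw [pvRow_len hg hi]; exact hj
  rw [pvGG, pvGS, lGetD_set_self hlen, lGetD_set_self hrl]

lemma pvGG_GS_ne {α : Type} (g : List (List α)) {i j a b : Nat} (hi : i < g.length)
    (hne : (i, j) ≠ (a, b)) (v d : α) : pvGG (pvGS g i j v) a b d = pvGG g a b d := by
  by_cases hia : i = a
  · subst hia
    have hjb : j ≠ b := fun h => hne (by rw [h])
    rw [pvGG, pvGS, lGetD_set_self hi, lGetD_set_ne _ hjb, pvGG]
  · rw [pvGG, pvGS, pvGG, lGetD_set_ne _ hia]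

lemma pvGS_self {α : Type} {g : List (List α)} {R C : Nat} (hg : pvShape g R C)
    {i j : Nat} (hi : i < R) (hj : j < C) {v : α} (hv : pvGG g i j v = v) :
    pvGS g i j v = g := by
  have hlen : i < g.length := by have := hg.1; omega
  have hrl : j < (g.getD i []).length := by rw [pvRow_len hg hi]; exact hj
  have hrow : (g.getD i []).set j v = g.getD i [] := by
    rw [pvGG, List.getD_eq_getElem?_getD, List.getElem?_eq_getElem hrl] at hv
    simp only [Option.getD_some] at hv
    rw [← hv]
    exact List.set_getElem_self hrl
  rw [pvGS, hrow, List.getD_eq_getElem _ _ hlen]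
  exact List.set_getElem_self hlen

lemma pvCount_set : ∀ (xs : List Bool) (j : Nat), j < xs.length → xs.getD j true = false →
    (xs.set j true).count false + 1 = xs.count false
  | [], j, h, _ => absurd h (by simp)
  | x :: xs, 0, _, hx => by
    simp only [List.getD_cons_zero] at hx
    subst hx
    simp
  | x :: xs, j + 1, h, hx => by
    have := pvCount_set xs j (by simpa using h) (by simpa using hx)
    simp only [List.set_cons_succ, List.count_cons]
    omega

lemma pvFalseCnt_GS : ∀ (V : List (List Bool)) (i : Nat), i < V.length →
    ∀ (j : Nat), j < (V.getD i []).length → pvGG V i j true = false →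
    pvFalseCnt (pvGS V i j true) + 1 = pvFalseCnt V
  | [], i, h, _, _, _ => absurd h (by simp)
  | row :: V, 0, _, j, hj, hx => by
    have := pvCount_set row j (by simpa using hj) (by simpa [pvGG] using hx)
    simp only [pvGS, List.getD_cons_zero, List.set_cons_zero, pvFalseCnt, List.map_cons,
      List.sum_cons]
    omega
  | row :: V, i + 1, h, j, hj, hx => by
    have := pvFalseCnt_GS V i (by simpa using h) j (by simpa using hj)
      (by simpa [pvGG] using hx)
    simp only [pvGS, List.getD_cons_succ, List.set_cons_succ, pvFalseCnt, List.map_cons,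
      List.sum_cons] at this ⊢
    omega

lemma pvFalseCnt_zero : ∀ {V : List (List Bool)}, pvFalseCnt V = 0 →
    ∀ {i j : Nat}, i < V.length → j < (V.getD i []).length → pvGG V i j false = true := by
  intro V h i j hi hj
  have hmem : V.getD i [] ∈ V := by
    rw [List.getD_eq_getElem _ _ hi]; exact List.getElem_mem _
  have hcnt : (V.getD i []).count false = 0 :=
    List.sum_eq_zero_iff.mp h _ (List.mem_map_of_mem hmem)
  have hnf : false ∉ V.getD i [] := by rwa [← List.count_eq_zero]
  rw [pvGG, List.getD_eq_getElem?_getD, List.getElem?_eq_getElem hj, Option.getD_some]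
  have hm : (V.getD i [])[j] ∈ V.getD i [] := List.getElem_mem _
  cases hval : (V.getD i [])[j] with
  | false => exact absurd (hval ▸ hm) hnf
  | true => rfl

lemma pvShape_replicate {α : Type} (R C : Nat) (x : α) :
    pvShape (List.replicate R (List.replicate C x)) R C := by
  refine ⟨by simp, ?_⟩
  intro row h
  rw [List.eq_of_mem_replicate h]
  simp

lemma pvGG_replicate {α : Type} {R C i j : Nat} (hi : i < R) (hj : j < C) (x d : α) :
    pvGG (List.replicate R (List.replicate C x)) i j d = x := by
  have h1 : (List.replicate R (List.replicate C x)).getD i [] = List.replicate C x := by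
    rw [List.getD_eq_getElem _ _ (by simpa using hi), List.getElem_replicate]
  rw [pvGG, h1, List.getD_eq_getElem _ _ (by simpa using hj), List.getElem_replicate]

lemma pvFalseCnt_replicate (R C : Nat) :
    pvFalseCnt (List.replicate R (List.replicate C false)) = R * C := by
  simp [pvFalseCnt, List.map_replicate, List.sum_replicate, List.count_replicate_self]

-- A's inner for-loop with break is exactly find?-then-update
lemma pvInner_eq (board : List (List String)) (R C : Int) (V : List (List Bool)) (r c : Int)
    (D : List (List Int)) (st : List (Int × Int)) (ns : List (Int × Int)) :
    pvInner board R C V r c D st ns =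
      match ns.find? (pvOk board R C V) with
      | none => (D, st)
      | some n => (pvSet2 D n.1 n.2 (min (pvGet2 D n.1 n.2 0) (1 + pvGet2 D r c 0)), n :: st) := by
  induction ns with
  | nil => rfl
  | cons n ns ih =>
    by_cases h : pvOk board R C V n = true
    · simp [pvInner, List.find?, h]
    · simp only [Bool.not_eq_true] at h
      simp [pvInner, List.find?, h, ih]

lemma pvLoopA_nil (board : List (List String)) (R C : Int) (f : Nat)
    (V : List (List Bool)) (D : List (List Int)) : pvLoopA board R C f [] V D = D := by
  cases f <;> rfl

lemma pvLoopA_step (board : List (List String)) (R C : Int) (f : Nat) (p : Int × Int)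
    (rest : List (Int × Int)) (V : List (List Bool)) (D : List (List Int)) :
    pvLoopA board R C (f + 1) (p :: rest) V D =
      if pvGet2 V p.1 p.2 false then pvLoopA board R C f rest V D
      else
        pvLoopA board R C f
          (pvInner board R C (pvSet2 V p.1 p.2 true) p.1 p.2 D rest
            (pvNeighbors (pvGet2 board p.1 p.2 "") p.1 p.2)).2
          (pvSet2 V p.1 p.2 true)
          (pvInner board R C (pvSet2 V p.1 p.2 true) p.1 p.2 D rest
            (pvNeighbors (pvGet2 board p.1 p.2 "") p.1 p.2)).1 := by
  simp only [pvLoopA]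

lemma pvInner_none {board : List (List String)} {R C : Int} {V : List (List Bool)}
    {ns : List (Int × Int)} (r c : Int) (D : List (List Int)) (st : List (Int × Int))
    (h : ns.find? (pvOk board R C V) = none) :
    pvInner board R C V r c D st ns = (D, st) := by
  rw [pvInner_eq, h]

lemma pvInner_some {board : List (List String)} {R C : Int} {V : List (List Bool)}
    {ns : List (Int × Int)} {n : Int × Int} (r c : Int) (D : List (List Int))
    (st : List (Int × Int)) (h : ns.find? (pvOk board R C V) = some n) :
    pvInner board R C V r c D st ns =
      (pvSet2 D n.1 n.2 (min (pvGet2 D n.1 n.2 0) (1 + pvGet2 D r c 0)), n :: st) := by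
  rw [pvInner_eq, h]

lemma pvWalk_none {board : List (List String)} {R C : Int} {seen : List (List Bool)}
    {r c : Int} (f : Nat)
    (h : (pvNeighbors (pvGet2 board r c "") r c).find? (pvOk board R C seen) = none) :
    pvWalk board R C (f + 1) seen r c = [(r, c)] := by
  simp only [pvWalk, h]

lemma pvWalk_some {board : List (List String)} {R C : Int} {seen : List (List Bool)}
    {r c : Int} {n : Int × Int} (f : Nat)
    (h : (pvNeighbors (pvGet2 board r c "") r c).find? (pvOk board R C seen) = some n) :
    pvWalk board R C (f + 1) seen r c
      = (r, c) :: pvWalk board R C f (pvSet2 seen n.1 n.2 true) n.1 n.2 := by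
  simp only [pvWalk, h]

lemma pvWalk_head (board : List (List String)) (R C : Int) (f : Nat)
    (seen : List (List Bool)) (r c : Int) :
    ∃ t, pvWalk board R C (f + 1) seen r c = (r, c) :: t := by
  unfold pvWalk
  cases (pvNeighbors (pvGet2 board r c "") r c).find? (pvOk board R C seen) with
  | none => exact ⟨[], rfl⟩
  | some n => exact ⟨_, rfl⟩

lemma pvOk_spec {board : List (List String)} {R C : Nat} {V : List (List Bool)} {n : Int × Int}
    (h : pvOk board (R : Int) (C : Int) V n = true) :
    0 ≤ n.1 ∧ n.1 < (R : Int) ∧ 0 ≤ n.2 ∧ n.2 < (C : Int) ∧ pvGet2 V n.1 n.2 false = false := by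
  simp [pvOk, pvValid] at h
  tauto

lemma pvEff_toNat {n : Nat} {i : Int} (h : 0 ≤ i) : pvEff n i = i.toNat := by
  simp [pvEff, h]

-- the key simulation: one A-iteration from a singleton stack ↔ one walk step plus one assignment
lemma pvKey (board : List (List String)) (R C : Nat) :
    ∀ (f : Nat) (V : List (List Bool)) (D : List (List Int)) (r c i : Int),
    pvShape V R C → pvShape D R C →
    PySem.Raise.InRange R r → PySem.Raise.InRange C c →
    pvGG V (pvEff R r) (pvEff C c) false = false →
    pvGG D (pvEff R r) (pvEff C c) 0 = i →
    (∀ a b : Nat, a < R → b < C → (a, b) ≠ (pvEff R r, pvEff C c) →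
        pvGG V a b false = false → pvGG D a b 0 = (R : Int) * (C : Int) + 1) →
    i + (pvFalseCnt V : Int) = (R : Int) * (C : Int) →
    pvFalseCnt V ≤ f + 1 →
    pvLoopA board (R : Int) (C : Int) (f + 1) [(r, c)] V D
      = pvAssign D (pvWalk board (R : Int) (C : Int) (f + 1) (pvSet2 V r c true) r c) i := by
  intro f
  induction f with
  | zero =>
    intro V D r c i hV hD hr hc hVf hDi h2 hcnt hfuel
    have heffr : pvEff R r < R := pvEff_lt hr
    have heffc : pvEff C c < C := pvEff_lt hc
    have hvis : pvGet2 V r c false = false := by rw [pvGet2_eq hV hr hc]; exact hVf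
    have hV'eq : pvSet2 V r c true = pvGS V (pvEff R r) (pvEff C c) true := pvSet2_eq hV hr hc true
    have hV' : pvShape (pvSet2 V r c true) R C := hV'eq ▸ pvShape_GS hV heffr _ _
    have hcntV' : pvFalseCnt (pvSet2 V r c true) + 1 = pvFalseCnt V := by
      rw [hV'eq]
      exact pvFalseCnt_GS V (pvEff R r) (by rw [hV.1]; exact heffr) (pvEff C c)
        (by rw [pvRow_len hV heffr]; exact heffc)
        (by rw [pvGG_irrel hV heffr heffc true false]; exact hVf)
    have hcnt0 : pvFalseCnt (pvSet2 V r c true) = 0 := by omega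
    have hfd : (pvNeighbors (pvGet2 board r c "") r c).find?
        (pvOk board (R : Int) (C : Int) (pvSet2 V r c true)) = none := by
      rw [List.find?_eq_none]
      intro n _ hok
      obtain ⟨h0nr, hnrR, h0nc, hncC, hVn⟩ := pvOk_spec hok
      have hInr : PySem.Raise.InRange R n.1 := ⟨by omega, hnrR⟩
      have hInc : PySem.Raise.InRange C n.2 := ⟨by omega, hncC⟩
      rw [pvGet2_eq hV' hInr hInc] at hVn
      have := pvFalseCnt_zero hcnt0 (i := pvEff R n.1) (j := pvEff C n.2)
        (by rw [hV'.1]; exact pvEff_lt hInr)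
        (by rw [pvRow_len hV' (pvEff_lt hInr)]; exact pvEff_lt hInc)
      rw [this] at hVn
      exact absurd hVn (by simp)
    rw [pvLoopA_step, hvis]
    simp only [Bool.false_eq_true, if_false, pvInner_none _ _ _ _ hfd]
    rw [pvLoopA_nil, pvWalk_none _ hfd]
    rw [pvAssign_cons]
    simp only [pvAssign, PySem.List.enumerate_nil, List.foldl_nil]
    rw [pvSet2_eq hD hr hc]
    exact (pvGS_self hD heffr heffc (by rw [pvGG_irrel hD heffr heffc i 0]; exact hDi)).symm
  | succ f ih =>
    intro V D r c i hV hD hr hc hVf hDi h2 hcnt hfuel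
    have heffr : pvEff R r < R := pvEff_lt hr
    have heffc : pvEff C c < C := pvEff_lt hc
    have hvis : pvGet2 V r c false = false := by rw [pvGet2_eq hV hr hc]; exact hVf
    have hV'eq : pvSet2 V r c true = pvGS V (pvEff R r) (pvEff C c) true := pvSet2_eq hV hr hc true
    have hV' : pvShape (pvSet2 V r c true) R C := hV'eq ▸ pvShape_GS hV heffr _ _
    have hcntV' : pvFalseCnt (pvSet2 V r c true) + 1 = pvFalseCnt V := by
      rw [hV'eq]
      exact pvFalseCnt_GS V (pvEff R r) (by rw [hV.1]; exact heffr) (pvEff C c)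
        (by rw [pvRow_len hV heffr]; exact heffc)
        (by rw [pvGG_irrel hV heffr heffc true false]; exact hVf)
    cases hfd : (pvNeighbors (pvGet2 board r c "") r c).find?
        (pvOk board (R : Int) (C : Int) (pvSet2 V r c true)) with
    | none =>
      rw [pvLoopA_step, hvis]
      simp only [Bool.false_eq_true, if_false, pvInner_none _ _ _ _ hfd]
      rw [pvLoopA_nil, pvWalk_none _ hfd]
      rw [pvAssign_cons]
      simp only [pvAssign, PySem.List.enumerate_nil, List.foldl_nil]
      rw [pvSet2_eq hD hr hc]
      exact (pvGS_self hD heffr heffc (by rw [pvGG_irrel hD heffr heffc i 0]; exact hDi)).symm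
    | some n =>
      have hok : pvOk board (R : Int) (C : Int) (pvSet2 V r c true) n = true :=
        List.find?_some hfd
      obtain ⟨h0nr, hnrR, h0nc, hncC, hVn⟩ := pvOk_spec hok
      have hInr : PySem.Raise.InRange R n.1 := ⟨by omega, hnrR⟩
      have hInc : PySem.Raise.InRange C n.2 := ⟨by omega, hncC⟩
      have heffnr : pvEff R n.1 = n.1.toNat := pvEff_toNat h0nr
      have heffnc : pvEff C n.2 = n.2.toNat := pvEff_toNat h0nc
      have hnrlt : n.1.toNat < R := by omega
      have hnclt : n.2.toNat < C := by omega
      have hVn' : pvGG (pvSet2 V r c true) n.1.toNat n.2.toNat false = false := by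
        rw [pvGet2_eq hV' hInr hInc, heffnr, heffnc] at hVn
        exact hVn
      have hne : (n.1.toNat, n.2.toNat) ≠ (pvEff R r, pvEff C c) := by
        intro h
        rw [show n.1.toNat = pvEff R r from congrArg Prod.fst h,
          show n.2.toNat = pvEff C c from congrArg Prod.snd h, hV'eq,
          pvGG_GS_self hV heffr heffc] at hVn'
        exact absurd hVn' (by simp)
      have hVnV : pvGG V n.1.toNat n.2.toNat false = false := by
        rw [hV'eq, pvGG_GS_ne V (by rw [hV.1]; exact heffr) (Ne.symm hne)] at hVn'
        exact hVn'
      have hDn : pvGG D n.1.toNat n.2.toNat 0 = (R : Int) * (C : Int) + 1 :=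
        h2 _ _ hnrlt hnclt hne hVnV
      have hminval : min (pvGet2 D n.1 n.2 0) (1 + pvGet2 D r c 0) = i + 1 := by
        rw [pvGet2_eq hD hInr hInc, heffnr, heffnc, hDn, pvGet2_eq hD hr hc, hDi]
        have : (0 : Int) ≤ (pvFalseCnt V : Int) := by positivity
        omega
      have hD'eq : pvSet2 D n.1 n.2 (min (pvGet2 D n.1 n.2 0) (1 + pvGet2 D r c 0))
          = pvGS D n.1.toNat n.2.toNat (i + 1) := by
        rw [hminval, pvSet2_eq hD hInr hInc, heffnr, heffnc]
      -- one A-iteration / one walk step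
      rw [pvLoopA_step, hvis]
      simp only [Bool.false_eq_true, if_false, pvInner_some _ _ _ _ hfd]
      rw [hD'eq]
      -- apply the induction hypothesis to the successor state
      have hstep := ih (pvSet2 V r c true) (pvGS D n.1.toNat n.2.toNat (i + 1)) n.1 n.2 (i + 1)
        hV' (pvShape_GS hD hnrlt _ _) hInr hInc
        (by rw [heffnr, heffnc]; exact hVn')
        (by rw [heffnr, heffnc]; exact pvGG_GS_self hD hnrlt hnclt _ _)
        (by
          intro a b ha hb hab hfalse
          rw [heffnr, heffnc] at hab
          have haeff : (a, b) ≠ (pvEff R r, pvEff C c) := by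
            intro h
            rw [Prod.mk.injEq] at h
            rw [h.1, h.2, hV'eq, pvGG_GS_self hV heffr heffc] at hfalse
            exact absurd hfalse (by simp)
          have hfV : pvGG V a b false = false := by
            rw [hV'eq, pvGG_GS_ne V (by rw [hV.1]; exact heffr) (Ne.symm haeff)] at hfalse
            exact hfalse
          rw [pvGG_GS_ne D (by rw [hD.1]; exact hnrlt) (Ne.symm hab)]
          exact h2 _ _ ha hb haeff hfV)
        (by
          have : pvFalseCnt (pvSet2 V r c true) + 1 = pvFalseCnt V := hcntV'
          omega)
        (by omega)
      rw [hstep]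
      -- both sides assign the same values along the same walk
      rw [pvWalk_some _ hfd]
      obtain ⟨t, ht⟩ := pvWalk_head board (R : Int) (C : Int) f
        (pvSet2 (pvSet2 V r c true) n.1 n.2 true) n.1 n.2
      rw [ht, pvAssign_cons, pvAssign_cons, pvAssign_cons]
      have hset1 : pvSet2 D r c i = D := by
        rw [pvSet2_eq hD hr hc]
        exact pvGS_self hD heffr heffc (by rw [pvGG_irrel hD heffr heffc i 0]; exact hDi)
      have hD'shape : pvShape (pvGS D n.1.toNat n.2.toNat (i + 1)) R C := pvShape_GS hD hnrlt _ _
      have hset2 : pvSet2 (pvGS D n.1.toNat n.2.toNat (i + 1)) n.1 n.2 (i + 1)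
          = pvGS D n.1.toNat n.2.toNat (i + 1) := by
        rw [pvSet2_eq hD'shape hInr hInc, heffnr, heffnc]
        exact pvGS_self hD'shape hnrlt hnclt
          (by rw [pvGG_irrel hD'shape hnrlt hnclt (i+1) 0]
              exact pvGG_GS_self hD hnrlt hnclt _ _)
      have hset3 : pvSet2 D n.1 n.2 (i + 1) = pvGS D n.1.toNat n.2.toNat (i + 1) := by
        rw [pvSet2_eq hD hInr hInc, heffnr, heffnc]
      rw [hset1, hset2, hset3]

theorem dfs_distances_spec : Claim_equal_dfs_distances := by
  intro board sr sc _ hpre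
  obtain ⟨hne, hrows, hsr, hsc⟩ := hpre
  unfold Spec_dfs_distances
  simp only [dfs_distances, dfs_distances_alt]
  set L : Nat := board.length
  set C : Nat := (PySem.List.pyGetD board 0 ([] : List String)).length
  have heffr : pvEff L sr < L := pvEff_lt hsr
  have heffc : pvEff C sc < C := pvEff_lt hsc
  have hV0 : pvShape (List.replicate L (List.replicate C false)) L C := pvShape_replicate L C false
  have hBase : pvShape (List.replicate L (List.replicate C ((L : Int) * (C : Int) + 1))) L C :=
    pvShape_replicate L C _
  have hD0eq : pvSet2 (List.replicate L (List.replicate C ((L : Int) * (C : Int) + 1))) sr sc 0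
      = pvGS (List.replicate L (List.replicate C ((L : Int) * (C : Int) + 1)))
          (pvEff L sr) (pvEff C sc) 0 := pvSet2_eq hBase hsr hsc 0
  have hD0 : pvShape (pvSet2 (List.replicate L (List.replicate C ((L : Int) * (C : Int) + 1))) sr sc 0) L C := by
    rw [hD0eq]; exact pvShape_GS hBase heffr _ _
  have hkey := pvKey board L C (L * C) (List.replicate L (List.replicate C false))
    (pvSet2 (List.replicate L (List.replicate C ((L : Int) * (C : Int) + 1))) sr sc 0)
    sr sc 0 hV0 hD0 hsr hsc
    (pvGG_replicate heffr heffc false false)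
    (by rw [hD0eq]; exact pvGG_GS_self hBase heffr heffc 0 0)
    (by
      intro a b ha hb hab _
      rw [hD0eq, pvGG_GS_ne _ (by simpa using heffr) (Ne.symm hab),
        pvGG_replicate ha hb])
    (by rw [pvFalseCnt_replicate]; push_cast; ring)
    (by rw [pvFalseCnt_replicate]; omega)
  rw [hkey]
  obtain ⟨t, ht⟩ := pvWalk_head board (L : Int) (C : Int) (L * C)
    (pvSet2 (List.replicate L (List.replicate C false)) sr sc true) sr sc
  have hassign : (PySem.List.enumerate (pvWalk board (L : Int) (C : Int) (L * C + 1)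
        (pvSet2 (List.replicate L (List.replicate C false)) sr sc true) sr sc) 0).foldl
        (fun d p => pvSet2 d p.2.1 p.2.2 p.1)
        (List.replicate L (List.replicate C ((L : Int) * (C : Int) + 1)))
      = pvAssign (List.replicate L (List.replicate C ((L : Int) * (C : Int) + 1)))
        (pvWalk board (L : Int) (C : Int) (L * C + 1)
          (pvSet2 (List.replicate L (List.replicate C false)) sr sc true) sr sc) 0 := rfl
  rw [hassign, ht, pvAssign_cons, pvAssign_cons]
  have hsetD0 : pvSet2 (pvSet2 (List.replicate L (List.replicate C ((L : Int) * (C : Int) + 1))) sr sc 0) sr sc 0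
      = pvSet2 (List.replicate L (List.replicate C ((L : Int) * (C : Int) + 1))) sr sc 0 := by
    rw [pvSet2_eq hD0 hsr hsc 0]
    exact pvGS_self hD0 heffr heffc
      (by rw [hD0eq, pvGG_GS_self hBase heffr heffc 0 0])
  rw [hsetD0]
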